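-- pv_equiv track=rewrite | github.com/codeprakhar25/agentdiff | scripts/prepare-ledger.py | dominant_event
-- ===== SOURCE A (Python) =====
-- from typing import Dict, List, Tuple
--
-- def dominant_event(events_by_file: Dict[str, dict], lines_by_file: Dict[str, List[Tuple[int, int]]]) -> dict:
--     """Pick the agent/model to use as the top-level record field.
--
--     Chooses the agent that wrote the most lines across all staged files.
--     Falls back to most-recently-touched file if line counts are equal.
--     """
--     if not events_by_file:
--         return {}
--     line_count: Dict[str, int] = {}
--     for fp, event in events_by_file.items():
--         agent = str(event.get("agent") or "human")
--         ranges = lines_by_file.get(fp, [])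
--         count = sum(max(0, b - a + 1) for a, b in ranges)
--         line_count[agent] = line_count.get(agent, 0) + count
--     dominant_agent = max(line_count, key=lambda a: line_count[a])
--     # Return the most recent event for the dominant agent
--     for fp, event in reversed(list(events_by_file.items())):
--         if str(event.get("agent") or "human") == dominant_agent:
--             return event
--     return next(iter(events_by_file.values()))
-- ===== SOURCE B (Python) =====
-- from typing import Dict, List, Tuple
--
-- def dominant_event(events_by_file: Dict[str, dict], lines_by_file: Dict[str, List[Tuple[int, int]]]) -> dict:
--     """Dict-free pipeline: dedup agents in first-occurrence order, pick the max
--     by a sum-over-filtered-items key, return the last event of that agent."""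
--     if not events_by_file:
--         return {}
--     items = list(events_by_file.items())
--
--     def agent_of(event):
--         return str(event.get("agent") or "human")
--
--     def weight(fp):
--         return sum(max(0, b - a + 1) for a, b in lines_by_file.get(fp, []))
--
--     agents = []
--     for fp, ev in items:
--         a = agent_of(ev)
--         if a not in agents:
--             agents.append(a)
--     dominant = max(agents, key=lambda a: sum(weight(fp) for fp, ev in items if agent_of(ev) == a))
--     return [ev for fp, ev in items if agent_of(ev) == dominant][-1]
-- ===== Notes on version B (the rewrite author's own statement) =====
-- stated objective: alternative
-- what changed: B drops A's dicts entirely: it dedups agents into a first-occurrence-ordered list, picks the dominant agent with max over that list keyed by a sum over the filtered items, and returns the last event of that agent from a filtered list instead of A's reversed rescan.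
import Mathlib
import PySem

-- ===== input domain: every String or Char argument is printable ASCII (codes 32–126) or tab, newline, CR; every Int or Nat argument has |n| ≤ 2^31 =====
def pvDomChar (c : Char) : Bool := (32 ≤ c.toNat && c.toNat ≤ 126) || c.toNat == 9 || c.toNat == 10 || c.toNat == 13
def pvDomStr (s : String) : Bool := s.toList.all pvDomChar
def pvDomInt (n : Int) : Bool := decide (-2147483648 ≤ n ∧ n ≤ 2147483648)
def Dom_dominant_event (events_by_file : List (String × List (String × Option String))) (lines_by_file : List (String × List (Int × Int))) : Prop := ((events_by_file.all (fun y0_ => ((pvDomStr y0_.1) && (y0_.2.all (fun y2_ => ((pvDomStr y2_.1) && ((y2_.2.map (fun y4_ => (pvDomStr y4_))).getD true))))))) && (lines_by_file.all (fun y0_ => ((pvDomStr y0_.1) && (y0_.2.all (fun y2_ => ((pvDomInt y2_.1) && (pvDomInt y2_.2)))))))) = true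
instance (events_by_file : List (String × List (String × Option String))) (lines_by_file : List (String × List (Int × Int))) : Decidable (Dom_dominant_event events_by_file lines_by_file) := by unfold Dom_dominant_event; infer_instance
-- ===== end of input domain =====

-- B is a dict-free alternative: agents are dedup'd into a first-occurrence list, the
-- dominant agent is max over that list keyed by a sum over the filtered items, and the
-- result is the last element of a filtered event list (no reversed rescan, no dicts).

-- shared helper: str(event.get("agent") or "human") — None or "" are falsy, so they give "human"
def pvAgentOf (ev : List (String × Option String)) : String :=
  match (PySem.Dict.mk ev).get? "agent" with
  | some (some s) => if s = "" then "human" else s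
  | _ => "human"

-- shared helper: sum(max(0, b - a + 1) for a, b in lines_by_file.get(fp, []))
def pvCountOf (lines_by_file : List (String × List (Int × Int))) (fp : String) : Int :=
  (((PySem.Dict.mk lines_by_file).getD fp []).map (fun r => max 0 (r.2 - r.1 + 1))).sum

-- ===== PORT A =====
def dominant_event (events_by_file : List (String × List (String × Option String))) (lines_by_file : List (String × List (Int × Int))) : List (String × Option String) :=
  if events_by_file = [] then []
  else
    let lc := events_by_file.foldl
      (fun lc p => lc.insert (pvAgentOf p.2) (lc.getD (pvAgentOf p.2) 0 + pvCountOf lines_by_file p.1))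
      PySem.Dict.empty
    match PySem.List.max? lc.keys (fun a => lc.getD a 0) with
    | none => []  -- unreachable: lc is nonempty here (max over an empty dict never happens)
    | some dominant_agent =>
      match events_by_file.reverse.find? (fun p => pvAgentOf p.2 == dominant_agent) with
      | some p => p.2
      | none =>  -- next(iter(events_by_file.values())); unreachable too
        match events_by_file with
        | [] => []
        | p :: _ => p.2

-- ===== PORT B =====
def dominant_event_alt (events_by_file : List (String × List (String × Option String))) (lines_by_file : List (String × List (Int × Int))) : List (String × Option String) :=
  if events_by_file = [] then []
  else
    -- agents = []; for fp, ev in items: if agent_of(ev) not in agents: agents.append(...)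
    let agents := events_by_file.foldl
      (fun agents p => if agents.contains (pvAgentOf p.2) then agents else agents ++ [pvAgentOf p.2]) []
    -- dominant = max(agents, key=lambda a: sum(weight(fp) for fp, ev in items if agent_of(ev) == a))
    match PySem.List.max? agents
        (fun a => ((events_by_file.filter (fun p => pvAgentOf p.2 == a)).map (fun p => pvCountOf lines_by_file p.1)).sum) with
    | none => []  -- unreachable: events_by_file ≠ [] gives at least one agent
    | some dominant =>
      -- [ev for fp, ev in items if agent_of(ev) == dominant][-1]
      match PySem.List.pyGet? ((events_by_file.filter (fun p => pvAgentOf p.2 == dominant)).map (fun p => p.2)) (-1) with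
      | some ev => ev
      | none => []  -- unreachable: dominant comes from agents, so the filter is nonempty

-- ===== PRECONDITION & SPEC =====
def Spec_dominant_event (events_by_file : List (String × List (String × Option String))) (lines_by_file : List (String × List (Int × Int))) (out : List (String × Option String)) : Prop := out = dominant_event_alt events_by_file lines_by_file
instance (events_by_file : List (String × List (String × Option String))) (lines_by_file : List (String × List (Int × Int))) (out : List (String × Option String)) : Decidable (Spec_dominant_event events_by_file lines_by_file out) := by unfold Spec_dominant_event; infer_instance

-- ===== CLAIM (what is proved, stated in full; the proofs are below) =====
def Claim_equal_dominant_event : Prop := ∀ (events_by_file : List (String × List (String × Option String))) (lines_by_file : List (String × List (Int × Int))), Dom_dominant_event events_by_file lines_by_file → Spec_dominant_event events_by_file lines_by_file (dominant_event events_by_file lines_by_file)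

-- ===== LEMMAS AND PROOFS =====

-- A's line_count keys (insertion order) are exactly B's dedup'd agent list.
theorem pv_keys_eq_agents (e : List (String × List (String × Option String)))
    (l : List (String × List (Int × Int))) :
    (e.foldl (fun lc p => lc.insert (pvAgentOf p.2) (lc.getD (pvAgentOf p.2) 0 + pvCountOf l p.1)) PySem.Dict.empty).keys
    = e.foldl (fun agents p => if agents.contains (pvAgentOf p.2) then agents else agents ++ [pvAgentOf p.2]) [] := by
  rw [PySem.Dict.keys_foldl_insert_key e (fun p => pvAgentOf p.2)
        (fun lc p => lc.getD (pvAgentOf p.2) 0 + pvCountOf l p.1) PySem.Dict.empty]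
  simp [PySem.Set.update, PySem.Set.add, List.foldl_map, PySem.Dict.keys_empty]

-- A's accumulated count for an agent is B's sum over the filtered items.
theorem pv_getD_eq_filter_sum (e : List (String × List (String × Option String)))
    (l : List (String × List (Int × Int))) (d : PySem.Dict String Int) (a : String) :
    (e.foldl (fun lc p => lc.insert (pvAgentOf p.2) (lc.getD (pvAgentOf p.2) 0 + pvCountOf l p.1)) d).getD a 0
    = d.getD a 0 + ((e.filter (fun p => pvAgentOf p.2 == a)).map (fun p => pvCountOf l p.1)).sum := by
  induction e generalizing d with
  | nil => simp
  | cons x t ih =>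
      simp only [List.foldl_cons, ih, List.filter_cons]
      by_cases h : pvAgentOf x.2 = a
      · simp [h]
        ring
      · have hb : (pvAgentOf x.2 == a) = false := beq_eq_false_iff_ne.mpr h
        simp [hb, PySem.Dict.getD_insert, Ne.symm h]

-- the running-max fold behind max? depends on the key only through its values on the list
theorem pv_maxfold_congr {A K : Type} [LT K] [DecidableLT K] (f g : A → K) :
    ∀ (xs : List A) (acc : Option A), (∀ x ∈ xs, f x = g x) → (∀ m ∈ acc, f m = g m) →
    xs.foldl (fun acc x => match acc with | none => some x | some m => if f m < f x then some x else some m) acc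
    = xs.foldl (fun acc x => match acc with | none => some x | some m => if g m < g x then some x else some m) acc := by
  intro xs
  induction xs with
  | nil => intro acc _ _; rfl
  | cons x t ih =>
      intro acc hxs hacc
      have hx : f x = g x := hxs x (by simp)
      have ht : ∀ y ∈ t, f y = g y := fun y hy => hxs y (by simp [hy])
      simp only [List.foldl_cons]
      cases acc with
      | none => exact ih (some x) ht (by intro m hm; simp at hm; subst hm; exact hx)
      | some m =>
          have hm : f m = g m := hacc m (by simp)
          simp only [hm, hx]
          exact ih _ ht (by intro m' hm'; split at hm' <;> simp at hm' <;> subst hm' <;> [exact hx; exact hm])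

-- max? depends on the key function only through its values on the list.
theorem pv_max?_congr {A K : Type} [LT K] [DecidableLT K] (xs : List A) (f g : A → K)
    (h : ∀ x ∈ xs, f x = g x) : PySem.List.max? xs f = PySem.List.max? xs g := by
  unfold PySem.List.max?
  exact pv_maxfold_congr f g xs none h (by simp)

-- every entry of B's dedup'd agent list is the agent of some event
theorem pv_mem_agents (e : List (String × List (String × Option String))) (dom : String)
    (h : dom ∈ e.foldl (fun agents p => if agents.contains (pvAgentOf p.2) then agents else agents ++ [pvAgentOf p.2]) []) :
    ∃ p ∈ e, pvAgentOf p.2 = dom := by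
  have : (e.foldl (fun agents p => if agents.contains (pvAgentOf p.2) then agents else agents ++ [pvAgentOf p.2]) [])
      = PySem.Set.ofList (e.map (fun p => pvAgentOf p.2)) := by
    simp [PySem.Set.ofList_eq_foldl, PySem.Set.add, List.foldl_map]
  rw [this, PySem.Set.mem_ofList] at h
  rcases List.mem_map.mp h with ⟨p, hp, hag⟩
  exact ⟨p, hp, hag⟩

-- xs[-1] on a nonempty list is its last element.
theorem pv_pyGet_neg_one {A : Type} (xs : List A) (h : xs ≠ []) :
    PySem.List.pyGet? xs (-1) = xs.getLast? := by
  have hn : 1 ≤ xs.length := List.length_pos_iff.mpr h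
  simp [PySem.List.pyGet?, PySem.List.pyIdx?, List.getLast?_eq_getElem?, hn]

-- ===== VERDICT (by name: the statement is the Claim_ definition above) =====
theorem dominant_event_spec : Claim_equal_dominant_event := by
  intro e l _hdom
  unfold Spec_dominant_event
  by_cases he : e = []
  · simp [dominant_event, dominant_event_alt, he]
  · simp only [dominant_event, dominant_event_alt, if_neg he]
    have hkeys := pv_keys_eq_agents e l
    have hmax :
        PySem.List.max?
          (e.foldl (fun lc p => lc.insert (pvAgentOf p.2) (lc.getD (pvAgentOf p.2) 0 + pvCountOf l p.1)) PySem.Dict.empty).keys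
          (fun a => (e.foldl (fun lc p => lc.insert (pvAgentOf p.2) (lc.getD (pvAgentOf p.2) 0 + pvCountOf l p.1)) PySem.Dict.empty).getD a 0)
        = PySem.List.max?
          (e.foldl (fun agents p => if agents.contains (pvAgentOf p.2) then agents else agents ++ [pvAgentOf p.2]) [])
          (fun a => ((e.filter (fun p => pvAgentOf p.2 == a)).map (fun p => pvCountOf l p.1)).sum) := by
      rw [hkeys]
      exact pv_max?_congr _ _ _ (fun a _ => by
        rw [pv_getD_eq_filter_sum]
        simp [PySem.Dict.getD, PySem.Dict.get?_empty])
    rw [hmax]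
    cases hm : PySem.List.max?
        (e.foldl (fun agents p => if agents.contains (pvAgentOf p.2) then agents else agents ++ [pvAgentOf p.2]) [])
        (fun a => ((e.filter (fun p => pvAgentOf p.2 == a)).map (fun p => pvCountOf l p.1)).sum) with
    | none => rfl
    | some dom =>
        obtain ⟨p0, hp0, hag⟩ := pv_mem_agents e dom (PySem.List.max?_mem hm)
        have hfil : e.filter (fun p => pvAgentOf p.2 == dom) ≠ [] := by
          intro hnil
          have : p0 ∈ e.filter (fun p => pvAgentOf p.2 == dom) :=
            List.mem_filter.mpr ⟨hp0, by simp [hag]⟩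
          simp [hnil] at this
        have hmapne : (e.filter (fun p => pvAgentOf p.2 == dom)).map (fun p => p.2) ≠ [] := by
          simpa using hfil
        dsimp only
        rw [pv_pyGet_neg_one _ hmapne, List.getLast?_map, ← List.getLast?_filter]
        cases hl : (e.filter (fun p => pvAgentOf p.2 == dom)).getLast? with
        | none => exact absurd (List.getLast?_eq_none_iff.mp hl) hfil
        | some p => rfl
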